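-- pv_equiv track=rewrite | github.com/danfmaia/PythonChallenges | NumberPalindrome.py | isPalindromeable
-- ===== SOURCE A (Python) =====
-- def isPalindromeable( list ):
-- 	assert list is list, "Argument is not a list: %r" % list
--
-- 	if (len(list) % 2) == 0 :
-- 		for i in range(10) :
-- 			if (list.count(i) % 2) == 1 :
-- 				return False
-- 	else:
-- 		oddCount = 0
-- 		for i in range(10) :
-- 			if (list.count(i) % 2) == 1 :
-- 				oddCount += 1
-- 			if oddCount > 1 :
-- 				return False
--
-- 	return True
-- ===== SOURCE B (Python) =====
-- def isPalindromeable(list):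
--     digits = {0, 1, 2, 3, 4, 5, 6, 7, 8, 9}
--     odd = set()
--     for d in list:
--         if d in digits:
--             if d in odd:
--                 odd.remove(d)
--             else:
--                 odd.add(d)
--     if len(list) % 2 == 0:
--         return len(odd) == 0
--     return len(odd) <= 1
-- ===== Notes on version B (the rewrite author's own statement) =====
-- stated objective: faster
-- what changed: Replaces the ten list.count scans over the whole list with a single pass maintaining a set of digits whose running count is odd, then checks that set's size against the list's length parity.
import Mathlib
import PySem

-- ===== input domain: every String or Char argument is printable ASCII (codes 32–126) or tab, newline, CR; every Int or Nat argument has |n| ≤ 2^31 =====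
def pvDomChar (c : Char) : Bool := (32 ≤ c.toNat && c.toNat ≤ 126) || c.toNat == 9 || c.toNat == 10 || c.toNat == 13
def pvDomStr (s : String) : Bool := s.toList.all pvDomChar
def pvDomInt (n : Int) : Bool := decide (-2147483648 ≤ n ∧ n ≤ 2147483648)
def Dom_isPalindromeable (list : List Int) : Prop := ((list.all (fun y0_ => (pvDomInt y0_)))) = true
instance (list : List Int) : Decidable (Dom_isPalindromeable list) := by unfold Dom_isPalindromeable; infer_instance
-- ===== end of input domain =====

-- B replaces A's ten whole-list count scans by one pass maintaining the set of digits with odd running count (objective: faster by a constant factor, one sweep instead of ten).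

-- ===== PORT A =====
-- even-length branch: 'for i in range(10): if list.count(i) % 2 == 1: return False'
def pvEvenLoop (list : List Int) : List Int → Bool
  | [] => true
  | i :: rest =>
    if PySem.List.count list i % 2 == 1 then false else pvEvenLoop list rest

-- odd-length branch with the running oddCount and its early 'return False'
def pvOddLoop (list : List Int) (oddCount : Int) : List Int → Bool
  | [] => true
  | i :: rest =>
    let oc := if PySem.List.count list i % 2 == 1 then oddCount + 1 else oddCount
    if oc > 1 then false else pvOddLoop list oc rest

def isPalindromeable (list : List Int) : Bool :=
  if (list.length : Int) % 2 == 0 then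
    pvEvenLoop list (PySem.List.pyRange 0 10 1)
  else
    pvOddLoop list 0 (PySem.List.pyRange 0 10 1)

-- ===== PORT B =====
def pvDigits : PySem.Set Int := PySem.Set.ofList [0, 1, 2, 3, 4, 5, 6, 7, 8, 9]

-- loop body: toggle d in/out of the odd-parity set when d is a digit
def pvToggle (odd : PySem.Set Int) (d : Int) : PySem.Set Int :=
  if PySem.Set.contains pvDigits d then
    (if PySem.Set.contains odd d then PySem.Set.discard odd d else PySem.Set.add odd d)
  else odd

def isPalindromeable_alt (list : List Int) : Bool :=
  let odd := list.foldl pvToggle PySem.Set.empty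
  if (list.length : Int) % 2 == 0 then
    PySem.Set.len odd == 0
  else
    decide (PySem.Set.len odd ≤ 1)

-- ===== PRECONDITION & SPEC =====
def Spec_isPalindromeable (list : List Int) (out : Bool) : Prop := out = isPalindromeable_alt list
instance (list : List Int) (out : Bool) : Decidable (Spec_isPalindromeable list out) := by unfold Spec_isPalindromeable; infer_instance

-- ===== CLAIM (what is proved, stated in full; the proofs are below) =====
def Claim_equal_isPalindromeable : Prop := ∀ (list : List Int), Dom_isPalindromeable list → Spec_isPalindromeable list (isPalindromeable list)

-- ===== LEMMAS AND PROOFS =====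

-- the digits with odd count in `list`, in range order
def pvOddDigits (list : List Int) : List Int :=
  ([0, 1, 2, 3, 4, 5, 6, 7, 8, 9] : List Int).filter (fun i => list.count i % 2 == 1)

lemma pvRange10 : PySem.List.pyRange 0 10 1 = ([0,1,2,3,4,5,6,7,8,9] : List Int) := by decide

lemma pvParity (l : List Int) (i : Int) :
    (PySem.List.count l i % 2 == 1) = (l.count i % 2 == 1) := by
  rw [PySem.List.count_eq]

lemma pvEvenLoop_eq (list : List Int) (r : List Int) :
    pvEvenLoop list r = (r.filter (fun i => list.count i % 2 == 1)).isEmpty := by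
  induction r with
  | nil => rfl
  | cons i rest ih =>
    rw [pvEvenLoop, pvParity, List.filter_cons]
    by_cases h : (list.count i % 2 == 1) = true <;> simp [h, ih]

lemma pvOddLoop_eq (list : List Int) (r : List Int) : ∀ (c : Int), 0 ≤ c → c ≤ 1 →
    pvOddLoop list c r =
      decide (c + (((r.filter (fun i => list.count i % 2 == 1)).length : Nat) : Int) ≤ 1) := by
  induction r with
  | nil =>
    intro c _ hc1
    simp [pvOddLoop, hc1]
  | cons i rest ih =>
    intro c hc0 hc1
    rw [pvOddLoop, pvParity, List.filter_cons]
    by_cases h : (list.count i % 2 == 1) = true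
    · simp only [h, if_true]
      by_cases h2 : c + 1 > 1
      · rw [if_pos h2, eq_comm, decide_eq_false_iff_not]
        have hl : (0:Int) ≤ ((rest.filter (fun i => list.count i % 2 == 1)).length : Int) :=
          Int.natCast_nonneg _
        simp only [List.length_cons]
        push_cast
        omega
      · rw [if_neg h2, ih (c + 1) (by omega) (by omega)]
        apply decide_eq_decide.mpr
        simp only [List.length_cons]
        push_cast
        omega
    · simp only [h, Bool.false_eq_true, if_false]
      rw [if_neg (by omega : ¬ c > 1), ih c hc0 hc1]

lemma pvDigits_mem (x : Int) : x ∈ pvDigits ↔ x ∈ ([0,1,2,3,4,5,6,7,8,9] : List Int) := by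
  unfold pvDigits
  rw [PySem.Set.mem_ofList]

lemma pvToggle_nodup (s : PySem.Set Int) (d : Int) (hs : List.Nodup s) :
    List.Nodup (pvToggle s d) := by
  unfold pvToggle
  split_ifs
  · exact PySem.Set.nodup_discard s d hs
  · exact PySem.Set.nodup_add s d hs
  · exact hs

lemma pvToggle_nondigit (s : PySem.Set Int) (d : Int)
    (hd : d ∉ ([0,1,2,3,4,5,6,7,8,9] : List Int)) : pvToggle s d = s := by
  unfold pvToggle
  rw [if_neg]
  intro hc
  exact hd ((pvDigits_mem d).mp ((PySem.Set.contains_iff pvDigits d).mp hc))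

lemma pvToggle_mem_ne (s : PySem.Set Int) (d x : Int) (hx : x ≠ d) :
    x ∈ pvToggle s d ↔ x ∈ s := by
  unfold pvToggle
  split_ifs with h1 h2
  · rw [PySem.Set.mem_discard]
    exact ⟨fun ⟨a, _⟩ => a, fun a => ⟨a, hx⟩⟩
  · rw [PySem.Set.mem_add]
    exact ⟨fun h => h.resolve_right hx, Or.inl⟩
  · exact Iff.rfl

lemma pvToggle_mem_self (s : PySem.Set Int) (d : Int)
    (hd : d ∈ ([0,1,2,3,4,5,6,7,8,9] : List Int)) : d ∈ pvToggle s d ↔ d ∉ s := by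
  unfold pvToggle
  rw [if_pos ((PySem.Set.contains_iff pvDigits d).mpr ((pvDigits_mem d).mpr hd))]
  by_cases h : d ∈ s
  · rw [if_pos ((PySem.Set.contains_iff s d).mpr h), PySem.Set.mem_discard]
    simp [h]
  · rw [if_neg (fun hc => h ((PySem.Set.contains_iff s d).mp hc)), PySem.Set.mem_add]
    simp [h]

-- invariant of B's single pass
lemma pvToggle_inv (l : List Int) : ∀ (s : PySem.Set Int), List.Nodup s →
    List.Nodup (l.foldl pvToggle s) ∧
    ∀ x, x ∈ l.foldl pvToggle s ↔
      ((x ∈ ([0,1,2,3,4,5,6,7,8,9] : List Int) ∧ (l.count x % 2 = 1 ↔ x ∉ s)) ∨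
       (x ∉ ([0,1,2,3,4,5,6,7,8,9] : List Int) ∧ x ∈ s)) := by
  induction l with
  | nil =>
    intro s hs
    refine ⟨hs, fun x => ?_⟩
    simp only [List.foldl_nil, List.count_nil]
    by_cases hd : x ∈ ([0,1,2,3,4,5,6,7,8,9] : List Int) <;>
      by_cases hx : x ∈ s <;> simp [hd, hx]
  | cons d l ih =>
    intro s hs
    obtain ⟨hn, hmem⟩ := ih (pvToggle s d) (pvToggle_nodup s d hs)
    refine ⟨hn, fun x => ?_⟩
    rw [List.foldl_cons, hmem x]
    by_cases he : x = d
    · subst he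
      by_cases hd : x ∈ ([0,1,2,3,4,5,6,7,8,9] : List Int)
      · have hc : (x :: l).count x = l.count x + 1 := by simp
        have hts := pvToggle_mem_self s x hd
        by_cases hx : x ∈ s <;>
          · simp only [hd, hc, hts, hx, true_and, not_true_eq_false, not_false_eq_true,
              iff_true, iff_false, and_true, and_false, or_false]
            constructor <;> intro h <;> omega
      · rw [pvToggle_nondigit s x hd]
        simp [hd]
    · have hc : (d :: l).count x = l.count x := by
        simp [(Ne.symm he : d ≠ x)]
      rw [pvToggle_mem_ne s d x he, hc]

lemma pvLen_eq (l : List Int) :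
    PySem.Set.len (l.foldl pvToggle PySem.Set.empty) = (((pvOddDigits l).length : Nat) : Int) := by
  obtain ⟨hn, hm⟩ := pvToggle_inv l PySem.Set.empty List.nodup_nil
  have hnd : (pvOddDigits l).Nodup := by
    rw [pvOddDigits]
    exact List.Nodup.filter _ (by decide)
  have hperm : (l.foldl pvToggle PySem.Set.empty).Perm (pvOddDigits l) := by
    rw [List.perm_ext_iff_of_nodup hn hnd]
    intro x
    rw [hm x, pvOddDigits, List.mem_filter]
    have hem : x ∉ (PySem.Set.empty : PySem.Set Int) := by simp [PySem.Set.empty]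
    constructor
    · rintro (⟨h1, h2⟩ | ⟨_, h2⟩)
      · exact ⟨h1, by simpa using h2.mpr hem⟩
      · exact absurd h2 hem
    · rintro ⟨h1, h2⟩
      exact Or.inl ⟨h1, iff_of_true (by simpa using h2) hem⟩
  have hlen := hperm.length_eq
  simp only [PySem.Set.len]
  exact_mod_cast hlen

-- ===== VERDICT (by name: the statement is the Claim_ definition above) =====
theorem isPalindromeable_spec : Claim_equal_isPalindromeable := by
  intro list _
  unfold Spec_isPalindromeable isPalindromeable isPalindromeable_alt
  rw [pvRange10]
  by_cases h : ((list.length : Int) % 2 == 0) = true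
  · simp only [h, if_true]
    rw [pvEvenLoop_eq, pvLen_eq]
    rw [pvOddDigits]
    rcases ([0,1,2,3,4,5,6,7,8,9] : List Int).filter (fun i => list.count i % 2 == 1) with _ | ⟨a, r⟩
    · simp
    · simp
      omega
  · simp only [h]
    rw [pvOddLoop_eq list _ 0 le_rfl (by omega), pvLen_eq]
    apply decide_eq_decide.mpr
    rw [pvOddDigits]
    omega
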